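-- pv_equiv track=rewrite | github.com/myoungcha-verily/genomics-v2f | pipeline/utils/hgvs_formatter.py | shorten_hgvs_p
-- ===== SOURCE A (Python) =====
-- def shorten_hgvs_p(hgvs_p: str) -> str:
--     """Convert 3-letter amino acid codes to 1-letter for compact display.
--
--     Example: p.Leu1982fs → p.L1982fs
--     """
--     aa_map = {
--         "Ala": "A", "Arg": "R", "Asn": "N", "Asp": "D", "Cys": "C",
--         "Gln": "Q", "Glu": "E", "Gly": "G", "His": "H", "Ile": "I",
--         "Leu": "L", "Lys": "K", "Met": "M", "Phe": "F", "Pro": "P",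
--         "Ser": "S", "Thr": "T", "Trp": "W", "Tyr": "Y", "Val": "V",
--         "Ter": "*",
--     }
--
--     result = hgvs_p
--     for three, one in aa_map.items():
--         result = result.replace(three, one)
--     return result
-- ===== SOURCE B (Python) =====
-- def shorten_hgvs_p(hgvs_p: str) -> str:
--     """Convert 3-letter amino acid codes to 1-letter for compact display.
--
--     Example: p.Leu1982fs → p.L1982fs
--     """
--     aa_map = {
--         "Ala": "A", "Arg": "R", "Asn": "N", "Asp": "D", "Cys": "C",
--         "Gln": "Q", "Glu": "E", "Gly": "G", "His": "H", "Ile": "I",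
--         "Leu": "L", "Lys": "K", "Met": "M", "Phe": "F", "Pro": "P",
--         "Ser": "S", "Thr": "T", "Trp": "W", "Tyr": "Y", "Val": "V",
--         "Ter": "*",
--     }
--
--     out = []
--     i = 0
--     n = len(hgvs_p)
--     while i < n:
--         one = aa_map.get(hgvs_p[i:i + 3])
--         if one is not None:
--             out.append(one)
--             i += 3
--         else:
--             out.append(hgvs_p[i])
--             i += 1
--     return "".join(out)
-- ===== Notes on version B (the rewrite author's own statement) =====
-- stated objective: alternative
-- what changed: Replaces the 21 sequential full-string str.replace passes by a single left-to-right scan with a cursor that looks up each 3-char window in aa_map once, emitting the 1-letter code or the current character.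
-- intended difference: On inputs containing one of the seven cascade substrings Alarg/Alasn/Alasp/Leuys/Thrrp/Thryr/Threr, A's earlier replace pass fabricates a new 3-letter code out of a 1-letter result plus following text and a later pass collapses it too (e.g. A('Threr')='*'), while B translates only codes present in the input (B('Threr')='Ter'), which is the intended behaviour for an amino-acid abbreviator. — e.g. on shorten_hgvs_p("Leuys"): A returns "K", B returns "Lys"
import Mathlib
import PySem

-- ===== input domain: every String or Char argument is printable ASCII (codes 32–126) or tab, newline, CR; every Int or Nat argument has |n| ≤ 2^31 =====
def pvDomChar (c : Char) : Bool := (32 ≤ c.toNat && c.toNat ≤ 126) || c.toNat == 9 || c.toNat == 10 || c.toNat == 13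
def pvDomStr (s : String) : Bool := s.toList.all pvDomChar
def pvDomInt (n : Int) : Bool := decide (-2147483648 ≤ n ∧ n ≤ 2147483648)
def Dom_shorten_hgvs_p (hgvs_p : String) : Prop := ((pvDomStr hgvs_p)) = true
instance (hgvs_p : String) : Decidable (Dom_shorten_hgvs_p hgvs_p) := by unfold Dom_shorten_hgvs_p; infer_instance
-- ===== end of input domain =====

-- B is a single left-to-right cursor scan instead of A's 21 sequential replace passes; on the
-- seven cascade substrings (D_ below) A's passes chain and B's intended per-code translation differs.

-- ===== PORT A =====
-- aa_map.items() of the literal dict, in insertion order.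
def aaItems : List (String × String) :=
  [("Ala", "A"), ("Arg", "R"), ("Asn", "N"), ("Asp", "D"), ("Cys", "C"),
   ("Gln", "Q"), ("Glu", "E"), ("Gly", "G"), ("His", "H"), ("Ile", "I"),
   ("Leu", "L"), ("Lys", "K"), ("Met", "M"), ("Phe", "F"), ("Pro", "P"),
   ("Ser", "S"), ("Thr", "T"), ("Trp", "W"), ("Tyr", "Y"), ("Val", "V"),
   ("Ter", "*")]

-- for three, one in aa_map.items(): result = result.replace(three, one)
def shorten_hgvs_p (hgvs_p : String) : String :=
  aaItems.foldl (fun result kv => PySem.Str.replace result kv.1 kv.2) hgvs_p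

-- ===== PORT B =====
-- the same aa_map, as B's dict, at the List Char level (str keys/values port to List Char)
def aaC : List (List Char × List Char) :=
  [(['A','l','a'], ['A']), (['A','r','g'], ['R']), (['A','s','n'], ['N']),
   (['A','s','p'], ['D']), (['C','y','s'], ['C']), (['G','l','n'], ['Q']),
   (['G','l','u'], ['E']), (['G','l','y'], ['G']), (['H','i','s'], ['H']),
   (['I','l','e'], ['I']), (['L','e','u'], ['L']), (['L','y','s'], ['K']),
   (['M','e','t'], ['M']), (['P','h','e'], ['F']), (['P','r','o'], ['P']),
   (['S','e','r'], ['S']), (['T','h','r'], ['T']), (['T','r','p'], ['W']),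
   (['T','y','r'], ['Y']), (['V','a','l'], ['V']), (['T','e','r'], ['*'])]

def aaDict : PySem.Dict (List Char) (List Char) := PySem.Dict.mk aaC

-- the while loop: look the 3-char window up in aa_map; emit the value and advance 3, else emit
-- the current character and advance 1 (the remaining input plays the role of the cursor)
def scanGo : List Char → List Char
  | [] => []
  | c :: t =>
    match aaDict.get? ((c :: t).take 3) with
    | some one => one ++ scanGo (t.drop 2)
    | none => c :: scanGo t
termination_by s => s.length
decreasing_by
  all_goals simp

def shorten_hgvs_p_alt (hgvs_p : String) : String :=
  String.ofList (scanGo hgvs_p.toList)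

-- ===== PRECONDITION & SPEC =====
-- On inputs containing one of these seven substrings, an early replace pass of A glues its 1-letter
-- result onto following text and fabricates a 3-letter code a later pass also collapses
-- (A "Threr" = "*"), while B translates only codes present in the input (B "Threr" = "Ter"),
-- the intended behaviour for an amino-acid abbreviator.
def D_shorten_hgvs_p (hgvs_p : String) : Prop :=
  PySem.Str.isIn "Alarg" hgvs_p = true ∨ PySem.Str.isIn "Alasn" hgvs_p = true ∨
  PySem.Str.isIn "Alasp" hgvs_p = true ∨ PySem.Str.isIn "Leuys" hgvs_p = true ∨
  PySem.Str.isIn "Thrrp" hgvs_p = true ∨ PySem.Str.isIn "Thryr" hgvs_p = true ∨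
  PySem.Str.isIn "Threr" hgvs_p = true
instance (hgvs_p : String) : Decidable (D_shorten_hgvs_p hgvs_p) := by
  unfold D_shorten_hgvs_p; infer_instance

def Spec_shorten_hgvs_p (hgvs_p : String) (out : String) : Prop :=
  ¬ D_shorten_hgvs_p hgvs_p → out = shorten_hgvs_p_alt hgvs_p
instance (hgvs_p : String) (out : String) : Decidable (Spec_shorten_hgvs_p hgvs_p out) := by
  unfold Spec_shorten_hgvs_p; infer_instance

def pvDiffWitness_shorten_hgvs_p : String := "Leuys"
def pvDiffWitnessOut_shorten_hgvs_p : String × String := ("K", "Lys")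

-- ===== CLAIM (what is proved, stated in full; the proofs are below) =====
def Claim_unchanged_shorten_hgvs_p : Prop := ∀ (hgvs_p : String), Dom_shorten_hgvs_p hgvs_p → Spec_shorten_hgvs_p hgvs_p (shorten_hgvs_p hgvs_p)
def Claim_exact_shorten_hgvs_p : Prop := ∀ (hgvs_p : String), Dom_shorten_hgvs_p hgvs_p → D_shorten_hgvs_p hgvs_p → shorten_hgvs_p hgvs_p ≠ shorten_hgvs_p_alt hgvs_p
def Claim_changed_shorten_hgvs_p : Prop := Dom_shorten_hgvs_p (pvDiffWitness_shorten_hgvs_p) ∧ D_shorten_hgvs_p (pvDiffWitness_shorten_hgvs_p) ∧ shorten_hgvs_p (pvDiffWitness_shorten_hgvs_p) = pvDiffWitnessOut_shorten_hgvs_p.1 ∧ shorten_hgvs_p_alt (pvDiffWitness_shorten_hgvs_p) = pvDiffWitnessOut_shorten_hgvs_p.2 ∧ pvDiffWitnessOut_shorten_hgvs_p.1 ≠ pvDiffWitnessOut_shorten_hgvs_p.2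

-- ===== LEMMAS AND PROOFS =====

-- clean recursive form of Python's str.replace (old nonempty): replace every occurrence, left to right
def rep (old new : List Char) (s : List Char) : List Char :=
  if h : old.isPrefixOf s ∧ 0 < old.length then new ++ rep old new (s.drop old.length)
  else
    match s with
    | [] => []
    | c :: t => c :: rep old new t
termination_by s.length
decreasing_by
  · have := (List.isPrefixOf_iff_prefix.mp h.1).length_le
    simp; omega
  · simp

lemma rep_nil {old new : List Char} (h0 : old ≠ []) : rep old new [] = [] := by
  rw [rep]
  rw [dif_neg]
  rintro ⟨h1, -⟩
  exact h0 (List.prefix_nil.mp (List.isPrefixOf_iff_prefix.mp h1))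

lemma rep_pos {old new s : List Char} (h : old <+: s) (h0 : old ≠ []) :
    rep old new s = new ++ rep old new (s.drop old.length) := by
  rw [rep, dif_pos ⟨List.isPrefixOf_iff_prefix.mpr h, List.length_pos_iff.mpr h0⟩]

lemma rep_neg {old new : List Char} {c : Char} {t : List Char} (h : ¬ old <+: (c :: t)) :
    rep old new (c :: t) = c :: rep old new t := by
  rw [rep, dif_neg (fun hp => h (List.isPrefixOf_iff_prefix.mp hp.1))]

lemma go_eq (old new : List Char) (h0 : old ≠ []) :
    ∀ (fuel : Nat) (l acc : List Char), l.length ≤ fuel →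
      PySem.Chars.replace.go old new fuel l acc = acc.reverse ++ rep old new l := by
  intro fuel
  induction fuel with
  | zero =>
    intro l acc hl
    have : l = [] := List.length_eq_zero_iff.mp (Nat.le_zero.mp hl)
    subst this
    simp [PySem.Chars.replace.go, rep_nil h0]
  | succ n ih =>
    intro l acc hl
    match l with
    | [] => simp [PySem.Chars.replace.go, rep_nil h0]
    | c :: t =>
      rw [PySem.Chars.replace.go]
      by_cases hp : old.isPrefixOf (c :: t)
      · rw [if_pos hp]
        have hpre := List.isPrefixOf_iff_prefix.mp hp
        have hlen : 0 < old.length := List.length_pos_iff.mpr h0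
        have hle : ((c :: t).drop old.length).length ≤ n := by
          simp at hl ⊢; omega
        rw [ih _ _ hle, rep_pos hpre h0]
        simp
      · rw [if_neg hp]
        have hle : t.length ≤ n := by simp at hl; omega
        rw [ih _ _ hle, rep_neg (fun hq => hp (List.isPrefixOf_iff_prefix.mpr hq))]
        simp

lemma replace_eq_rep {s old new : List Char} (h0 : old ≠ []) :
    PySem.Chars.replace s old new = rep old new s := by
  rw [PySem.Chars.replace]
  rw [if_neg (by simpa [List.isEmpty_iff] using h0)]
  simpa using go_eq old new h0 s.length s [] le_rfl

-- lowercase-letter test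
def lowB (c : Char) : Bool := ('a' ≤ c && c ≤ 'z')

-- the shape every aa_map entry has: key = uppercase :: two lowercase, value = one non-lowercase char
def shapeB (kv : List Char × List Char) : Bool :=
  match kv with
  | ([u, a, b], [v]) => !lowB u && lowB a && lowB b && !lowB v
  | _ => false

lemma shape_elim {kv : List Char × List Char} (hs : shapeB kv = true) :
    ∃ u a b v, kv = ([u, a, b], [v]) ∧ lowB u = false ∧ lowB a = true ∧ lowB b = true ∧ lowB v = false := by
  obtain ⟨k, w⟩ := kv
  match k, w with
  | [u, a, b], [v] =>
    refine ⟨u, a, b, v, rfl, ?_, ?_, ?_, ?_⟩ <;> simp [shapeB] at hs <;> simp [hs]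
  | [], _ | [_], _ | [_,_], _ | (_::_::_::_::_), _ => simp [shapeB] at hs
  | [_,_,_], [] | [_,_,_], (_::_::_) => simp [shapeB] at hs

lemma singleton_prefix_iff {e : Char} {y : List Char} : [e] <+: y ↔ y.head? = some e := by
  cases y with
  | nil => simp
  | cons c t => simp [List.cons_prefix_cons, eq_comm]

-- a replace pass with a non-lowercase value never creates a lowercase head character
lemma rep_head_low {u a b v d : Char} (hv : lowB v = false) (hd : lowB d = true) :
    ∀ x : List Char, (rep [u, a, b] [v] x).head? = some d → x.head? = some d := by
  intro x hx
  match x with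
  | [] => rw [rep_nil (by simp)] at hx; simp at hx
  | c :: t =>
    by_cases hp : [u, a, b] <+: (c :: t)
    · rw [rep_pos hp (by simp)] at hx
      simp at hx
      rw [hx] at hv
      rw [hd] at hv
      exact absurd hv (by simp)
    · rw [rep_neg hp] at hx
      simpa using hx

-- …nor a two-lowercase-character prefix
lemma rep_prefix2_low {u a b v d e : Char} (hv : lowB v = false)
    (hd : lowB d = true) (he : lowB e = true) :
    ∀ x : List Char, [d, e] <+: rep [u, a, b] [v] x → [d, e] <+: x := by
  intro x hx
  match x with
  | [] => rw [rep_nil (by simp)] at hx; simp at hx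
  | c :: t =>
    by_cases hp : [u, a, b] <+: (c :: t)
    · rw [rep_pos hp (by simp)] at hx
      have hx' : [d, e] <+: v :: rep [u, a, b] [v] ((c :: t).drop ([u, a, b] : List Char).length) := hx
      obtain ⟨hdv, -⟩ := List.cons_prefix_cons.mp hx'
      rw [hdv] at hd; rw [hd] at hv
      exact absurd hv (by simp)
    · rw [rep_neg hp] at hx
      obtain ⟨hdc, hrest⟩ := List.cons_prefix_cons.mp hx
      have : t.head? = some e := rep_head_low hv he t (singleton_prefix_iff.mp hrest)
      obtain ⟨t', ht'⟩ : ∃ t', t = e :: t' := by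
        cases t with
        | nil => simp at this
        | cons x xs => simp at this; exact ⟨xs, by rw [this]⟩
      rw [hdc, ht']
      exact ⟨t', rfl⟩

-- the sequential replace passes, as a fold
def chain (L : List (List Char × List Char)) (s : List Char) : List Char :=
  L.foldl (fun r kv => rep kv.1 kv.2 r) s

lemma chain_nil {L : List (List Char × List Char)} (hL : L.all shapeB = true) :
    chain L [] = [] := by
  induction L with
  | nil => rfl
  | cons kv L' ih =>
    simp at hL
    obtain ⟨u, a, b, v, hkv, -⟩ := shape_elim hL.1
    have : chain (kv :: L') [] = chain L' (rep kv.1 kv.2 []) := rfl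
    rw [this, hkv]
    rw [show ((([u,a,b],[v]) : List Char × List Char).1) = [u,a,b] from rfl]
    rw [rep_nil (by simp)]
    exact ih (by simp [List.all_eq_true] at hL ⊢; exact hL.2)

lemma chain_prefix2_low {L : List (List Char × List Char)} {d e : Char}
    (hL : L.all shapeB = true) (hd : lowB d = true) (he : lowB e = true) :
    ∀ x, [d, e] <+: chain L x → [d, e] <+: x := by
  induction L with
  | nil => intro x hx; exact hx
  | cons kv L' ih =>
    intro x hx
    simp only [List.all_cons, Bool.and_eq_true] at hL
    obtain ⟨u, a, b, v, hkv, -, -, -, hv⟩ := shape_elim hL.1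
    have h1 : [d, e] <+: rep kv.1 kv.2 x := ih hL.2 _ hx
    rw [hkv] at h1
    exact rep_prefix2_low hv hd he x h1

-- the workhorse: a head character survives the whole chain when no key can fire on it
lemma chain_cons_gen {L : List (List Char × List Char)} {c : Char}
    (hL : L.all shapeB = true) :
    ∀ x, (∀ kv ∈ L, ∀ a b, kv.1 = [c, a, b] → ¬ [a, b] <+: x) →
      chain L (c :: x) = c :: chain L x := by
  induction L with
  | nil => intro x _; rfl
  | cons kv L' ih =>
    intro x hsafe
    simp only [List.all_cons, Bool.and_eq_true] at hL
    obtain ⟨u, a, b, v, hkv, hu, ha, hb, hv⟩ := shape_elim hL.1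
    have hnp : ¬ kv.1 <+: (c :: x) := by
      intro hp
      rw [hkv] at hp
      obtain ⟨huc, hrest⟩ := List.cons_prefix_cons.mp hp
      exact hsafe kv (by simp) a b (by rw [hkv]; simp [huc]) hrest
    have step : chain (kv :: L') (c :: x) = chain L' (rep kv.1 kv.2 (c :: x)) := rfl
    have hsafe' : ∀ kv' ∈ L', ∀ a' b', kv'.1 = [c, a', b'] → ¬ [a', b'] <+: rep kv.1 kv.2 x := by
      intro kv' hkv' a' b' hkey hpre
      obtain ⟨u', a'', b'', v', hkv'', -, ha'0, hb'0, -⟩ :=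
        shape_elim (List.all_eq_true.mp hL.2 kv' hkv')
      have ha2 : lowB a' = true := by
        rw [hkv''] at hkey; injection hkey with h1 h2; injection h2 with h3 h4
        rw [h3] at ha'0; exact ha'0
      have hb2 : lowB b' = true := by
        rw [hkv''] at hkey; injection hkey with h1 h2; injection h2 with h3 h4
        injection h4 with h5 h6; rw [h5] at hb'0; exact hb'0
      have : [a', b'] <+: x := by
        rw [hkv] at hpre
        exact rep_prefix2_low hv ha2 hb2 x hpre
      exact hsafe kv' (by simp [hkv']) a' b' hkey this
    rw [step, rep_neg hnp, ih hL.2 (rep kv.1 kv.2 x) hsafe']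
    rfl

-- a lowercase head always survives (keys start with an uppercase letter)
lemma chain_cons_low {L : List (List Char × List Char)} {c : Char}
    (hL : L.all shapeB = true) (hc : lowB c = true) (x : List Char) :
    chain L (c :: x) = c :: chain L x := by
  apply chain_cons_gen hL
  intro kv hkv a b hkey _
  obtain ⟨u, a', b', v, hkv', hu, -, -, -⟩ :=
    shape_elim (List.all_eq_true.mp hL kv hkv)
  rw [hkv'] at hkey
  injection hkey with h1 _
  rw [h1] at hu
  rw [hc] at hu
  exact absurd hu (by simp)

-- the later-pass cascade check: key kv fires, a strictly later key starts with kv's value char —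
-- then the glued 5-character string is one of the declared patterns
def pvPatternsC : List (List Char) :=
  [['A','l','a','r','g'], ['A','l','a','s','n'], ['A','l','a','s','p'], ['L','e','u','y','s'],
   ['T','h','r','r','p'], ['T','h','r','y','r'], ['T','h','r','e','r']]

def cascOK : List (List Char × List Char) → Bool
  | [] => true
  | kv :: rest =>
    rest.all (fun kv' =>
      match kv.2, kv'.1 with
      | [v], u :: ab => (u != v) || decide ((kv.1 ++ ab) ∈ pvPatternsC)
      | _, _ => true) && cascOK rest

lemma cascOK_suffix : ∀ (P L : List (List Char × List Char)),
    cascOK (P ++ L) = true → cascOK L = true := by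
  intro P
  induction P with
  | nil => intro L h; exact h
  | cons kv P' ih =>
    intro L h
    rw [List.cons_append, cascOK, Bool.and_eq_true] at h
    exact ih L h.2

-- the three decidable facts about the literal map
lemma fact_shape : aaC.all shapeB = true := by decide
lemma fact_nodup : (aaC.map Prod.fst).Nodup := by decide
lemma fact_casc : cascOK aaC = true := by decide
lemma fact_items : aaItems.map (fun kv => (kv.1.toList, kv.2.toList)) = aaC := by decide

lemma shape_sub {L P : List (List Char × List Char)} (h : L.all shapeB = true)
    (hsub : ∀ kv ∈ P, kv ∈ L) : P.all shapeB = true := by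
  simp only [List.all_eq_true] at h ⊢
  exact fun kv hkv => h kv (hsub kv hkv)

-- pattern-freeness, and its closure under infix
def PF (s : List Char) : Prop := ∀ p ∈ pvPatternsC, ¬ p <:+: s

lemma PF_infix {s t : List Char} (h : t <:+: s) (hs : PF s) : PF t :=
  fun p hp hpt => hs p hp (hpt.trans h)

-- a replace pass leaves a head character alone when the key cannot start there
lemma rep_cons_head_ne {old new : List Char} {c : Char} {w : List Char}
    (h : old.head? ≠ some c) : rep old new (c :: w) = c :: rep old new w := by
  match old with
  | [] => rw [rep, dif_neg (by rintro ⟨-, h2⟩; simp at h2)]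
  | o :: or =>
    apply rep_neg
    intro hp
    apply h
    simp [(List.cons_prefix_cons.mp hp).1]

lemma ne_of_lowB {a c : Char} (h1 : lowB a = false) (h2 : lowB c = true) : a ≠ c := by
  intro he; rw [he, h2] at h1; exact absurd h1 (by simp)

lemma chain_cons_nohead {L : List (List Char × List Char)} {c : Char}
    (hh : ∀ kv ∈ L, kv.1.head? ≠ some c) :
    ∀ w, chain L (c :: w) = c :: chain L w := by
  induction L with
  | nil => intro w; rfl
  | cons kv L' ih =>
    intro w
    have step : chain (kv :: L') (c :: w) = chain L' (rep kv.1 kv.2 (c :: w)) := rfl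
    rw [step, rep_cons_head_ne (hh kv (by simp)), ih (fun kv' h => hh kv' (by simp [h])) _]
    rfl

-- the first entry of the dict whose key is the probe, read off a split (keys are distinct)
lemma find?_key : ∀ (Pl : List (List Char × List Char)) (L rest : List (List Char × List Char))
    (kv : List Char × List Char),
    (L.map Prod.fst).Nodup → L = Pl ++ kv :: rest →
    L.find? (fun p => p.1 == kv.1) = some kv := by
  intro Pl
  induction Pl with
  | nil =>
    intro L rest kv _ hL; subst hL
    rw [List.nil_append, List.find?_cons_of_pos (by simp)]
  | cons q Pl' ih =>
    intro L rest kv hnd hL; subst hL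
    have hmem : kv.1 ∈ (Pl' ++ kv :: rest).map Prod.fst := by simp
    simp only [List.cons_append, List.map_cons, List.nodup_cons] at hnd
    have hne : q.1 ≠ kv.1 := by
      intro he; exact hnd.1 (he ▸ hmem)
    have hq : ¬ ((fun p : List Char × List Char => p.1 == kv.1) q = true) := by simp [hne]
    rw [List.cons_append,
        List.find?_cons_of_neg (p := fun p : List Char × List Char => p.1 == kv.1)
          (a := q) (l := Pl' ++ kv :: rest) hq]
    exact ih _ rest kv hnd.2 rfl

-- no key matches the front window: the head survives the whole chain
lemma chain_nokey (c : Char) (t : List Char)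
    (hfind : aaC.find? (fun p => p.1 == (c :: t).take 3) = none) :
    chain aaC (c :: t) = c :: chain aaC t := by
  have hnopre : ∀ kv ∈ aaC, ¬ kv.1 <+: c :: t := by
    intro kv hkv hp
    obtain ⟨u, a, b, v, hkv', -⟩ :=
      shape_elim (List.all_eq_true.mp fact_shape kv hkv)
    have htake : kv.1 = (c :: t).take 3 := by
      have := List.prefix_iff_eq_take.mp hp
      rw [hkv'] at this ⊢
      simpa using this
    have := List.find?_eq_none.mp hfind kv hkv
    simp [htake] at this
  exact chain_cons_gen fact_shape t (fun kv hkv a b hkey hpre =>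
    hnopre kv hkv (by rw [hkey]; exact List.cons_prefix_cons.mpr ⟨rfl, hpre⟩))

-- the found key fires once at the front and the rest of the chain passes the value through,
-- provided no declared pattern sits at the front
lemma chain_key_step (s : List Char) (kvf : List Char × List Char) (u a b v : Char) (t : List Char)
    (hfind : aaC.find? (fun p => p.1 == s.take 3) = some kvf)
    (hkvf : kvf = ([u, a, b], [v])) (hst : s = u :: a :: b :: t)
    (hnp : ∀ p ∈ pvPatternsC, ¬ p <+: s) :
    chain aaC s = v :: chain aaC t := by
  have hmem : kvf ∈ aaC := List.mem_of_find?_eq_some hfind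
  obtain ⟨u0, a0, b0, v0, hkvf0, hu0, ha0, hb0, hv0⟩ :=
    shape_elim (List.all_eq_true.mp fact_shape kvf hmem)
  rw [hkvf] at hkvf0
  have hinj : u = u0 ∧ a = a0 ∧ b = b0 ∧ v = v0 := by
    simp only [Prod.mk.injEq, List.cons.injEq, and_true] at hkvf0
    tauto
  obtain ⟨e1, e2, e3, e4⟩ := hinj
  have hu : lowB u = false := by rw [e1]; exact hu0
  have ha : lowB a = true := by rw [e2]; exact ha0
  have hb : lowB b = true := by rw [e3]; exact hb0
  have hv : lowB v = false := by rw [e4]; exact hv0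
  have hk1 : kvf.1 = [u, a, b] := by rw [hkvf]
  have hk2 : kvf.2 = [v] := by rw [hkvf]
  obtain ⟨P, S, hsplit⟩ := List.append_of_mem hmem
  have hshapeP : P.all shapeB = true :=
    shape_sub fact_shape (fun kv hkv => by rw [hsplit]; simp [hkv])
  have hshapeS : S.all shapeB = true :=
    shape_sub fact_shape (fun kv hkv => by rw [hsplit]; simp [hkv])
  have hshapePk : (P ++ [kvf]).all shapeB = true :=
    shape_sub fact_shape (fun kv hkv => by
      rw [hsplit]; simp at hkv ⊢
      rcases hkv with h | h
      · exact Or.inl h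
      · exact Or.inr (Or.inl h))
  have hPne : ∀ kv' ∈ P, kv'.1 ≠ kvf.1 := by
    intro kv' hkv' heq
    have hnd := fact_nodup
    rw [hsplit] at hnd
    simp only [List.map_append, List.map_cons] at hnd
    rw [List.nodup_append] at hnd
    exact hnd.2.2 kv'.1 (List.mem_map_of_mem (f := Prod.fst) hkv') kvf.1 (by simp) heq
  have step1 : chain P s = u :: a :: b :: chain P t := by
    rw [hst]
    rw [chain_cons_gen hshapeP (a :: b :: t) ?_]
    · rw [chain_cons_low hshapeP ha, chain_cons_low hshapeP hb]
    · intro kv' hkv' a' b' hkey' hpre'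
      obtain ⟨hca, hrest⟩ := List.cons_prefix_cons.mp hpre'
      have hcb : b' = b := by
        have := singleton_prefix_iff.mp hrest
        simpa using this.symm
      apply hPne kv' hkv'
      rw [hkey', hk1, hca, hcb]
  have step2 : rep kvf.1 kvf.2 (chain P s) = v :: chain (P ++ [kvf]) t := by
    rw [step1, hk1, hk2]
    have hpre : [u, a, b] <+: (u :: a :: b :: chain P t) := ⟨chain P t, rfl⟩
    rw [rep_pos hpre (by simp)]
    have hdrop : (u :: a :: b :: chain P t).drop ([u, a, b] : List Char).length = chain P t := rfl
    rw [hdrop]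
    have : chain (P ++ [kvf]) t = rep kvf.1 kvf.2 (chain P t) := by
      simp [chain, List.foldl_append]
    rw [this, hk1, hk2]
    rfl
  have step3 : chain S (v :: chain (P ++ [kvf]) t) = v :: chain S (chain (P ++ [kvf]) t) := by
    apply chain_cons_gen hshapeS
    intro kv' hkv' a' b' hkey' hpre'
    have hfs : ∀ kv ∈ aaC, shapeB kv = true := List.all_eq_true.mp fact_shape
    obtain ⟨u'', a'', b'', v'', hkv'', -, ha'', hb'', -⟩ :=
      shape_elim (hfs kv' (by rw [hsplit]; simp [hkv']))
    have ha' : lowB a' = true := by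
      rw [hkv''] at hkey'; injection hkey' with h1 h2; injection h2 with h3 h4
      rw [h3] at ha''; exact ha''
    have hb' : lowB b' = true := by
      rw [hkv''] at hkey'; injection hkey' with h1 h2; injection h2 with h3 h4
      injection h4 with h5 h6; rw [h5] at hb''; exact hb''
    have h2 : [a', b'] <+: t := chain_prefix2_low hshapePk ha' hb' t hpre'
    have hc := cascOK_suffix P (kvf :: S) (by rw [← hsplit]; exact fact_casc)
    rw [cascOK, Bool.and_eq_true] at hc
    have hcel := List.all_eq_true.mp hc.1 kv' hkv'
    rw [hk2, hkey'] at hcel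
    simp only [bne_self_eq_false, Bool.false_or, decide_eq_true_eq] at hcel
    apply hnp (kvf.1 ++ [a', b']) hcel
    rw [hk1, hst]
    obtain ⟨r, hr⟩ := h2
    exact ⟨r, by rw [List.append_assoc]; simp [hr]⟩
  conv_lhs => rw [hsplit]
  have e1 : chain (P ++ kvf :: S) s = chain S (rep kvf.1 kvf.2 (chain P s)) := by
    simp [chain, List.foldl_append]
  rw [e1, step2, step3]
  have e2 : chain S (chain (P ++ [kvf]) t) = chain aaC t := by
    rw [hsplit]
    simp [chain, List.foldl_append]
  rw [e2]

-- ===== the main equivalence on pattern-free lists =====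
lemma chain_eq_scan : ∀ (n : Nat) (s : List Char), s.length ≤ n → PF s → chain aaC s = scanGo s := by
  intro n
  induction n with
  | zero =>
    intro s hl _
    have : s = [] := List.length_eq_zero_iff.mp (Nat.le_zero.mp hl)
    subst this
    rw [chain_nil fact_shape, scanGo]
  | succ n ih =>
    intro s hl hpf
    cases hfind : aaC.find? (fun p => p.1 == s.take 3) with
    | none =>
      cases s with
      | nil => rw [chain_nil fact_shape, scanGo]
      | cons c t =>
        have hget : aaDict.get? ((c :: t).take 3) = none := by
          simp only [aaDict, PySem.Dict.get?, hfind, Option.map_none]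
        rw [scanGo, hget, chain_nokey c t hfind]
        rw [ih t (by simp at hl; omega) (PF_infix (List.IsSuffix.isInfix ⟨[c], rfl⟩) hpf)]
    | some kvf =>
      have hmem : kvf ∈ aaC := List.mem_of_find?_eq_some hfind
      have hpred := List.find?_some hfind
      have hkey : kvf.1 = s.take 3 := by simpa using hpred
      obtain ⟨u, a, b, v, hkvf, hu, ha, hb, hv⟩ :=
        shape_elim (List.all_eq_true.mp fact_shape kvf hmem)
      have hk2 : kvf.2 = [v] := by rw [hkvf]
      have htake : s.take 3 = [u, a, b] := by rw [← hkey, hkvf]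
      obtain ⟨t, hst⟩ : ∃ t, s = u :: a :: b :: t := by
        refine ⟨s.drop 3, ?_⟩
        conv_lhs => rw [← List.take_append_drop 3 s]
        rw [htake]
        rfl
      have hnp : ∀ p ∈ pvPatternsC, ¬ p <+: s := fun p hp hpre =>
        hpf p hp (List.IsPrefix.isInfix hpre)
      rw [chain_key_step s kvf u a b v t hfind hkvf hst hnp]
      have hget : aaDict.get? ((u :: a :: b :: t).take 3) = some kvf.2 := by
        have h3 : (u :: a :: b :: t).take 3 = s.take 3 := by rw [hst]
        rw [h3]
        simp only [aaDict, PySem.Dict.get?, hfind, Option.map_some]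
      rw [hst, scanGo, hget, hk2]
      have hlt : t.length ≤ n := by rw [hst] at hl; simp at hl; omega
      have hpt : PF t := PF_infix (List.IsSuffix.isInfix ⟨[u, a, b], by simp [hst]⟩) hpf
      show v :: chain aaC t = [v] ++ scanGo t
      rw [ih t hlt hpt]
      rfl

-- ===== tightness: a pattern at the very front forces different outputs =====
lemma cascade_head
    (Pl mids S2 : List (List Char × List Char))
    (u l1 l2 x y v v' : Char)
    (hsplit : aaC = Pl ++ ([u, l1, l2], [v]) :: (mids ++ ([v, x, y], [v']) :: S2))
    (hPl : Pl.all (fun kv => kv.1.head? != some u) = true)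
    (hmids : mids.all (fun kv => kv.1 != [v, x, y]) = true)
    (hS2 : S2.all (fun kv => kv.1.head? != some v') = true)
    (hl1 : lowB l1 = true) (hl2 : lowB l2 = true) (hx : lowB x = true) (hy : lowB y = true)
    (hvne : v' ≠ v) :
    ∀ w, chain aaC (u :: l1 :: l2 :: x :: y :: w) ≠ scanGo (u :: l1 :: l2 :: x :: y :: w) := by
  intro w heq
  have hkvmem : (([u, l1, l2], [v]) : List Char × List Char) ∈ aaC := by rw [hsplit]; simp
  obtain ⟨u0, a0, b0, v0, hkv0, hu0, -, -, -⟩ :=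
    shape_elim (List.all_eq_true.mp fact_shape _ hkvmem)
  injection hkv0 with hKey hVal0
  injection hKey with e1 hKey2
  have hu : lowB u = false := by rw [e1]; exact hu0
  have hfind : aaC.find? (fun p => p.1 == ((u :: l1 :: l2 :: x :: y :: w).take 3))
      = some ([u, l1, l2], [v]) := by
    have h3 : (u :: l1 :: l2 :: x :: y :: w).take 3 = [u, l1, l2] := rfl
    rw [h3]
    exact find?_key Pl aaC _ _ fact_nodup hsplit
  have hB : scanGo (u :: l1 :: l2 :: x :: y :: w)
      = [v] ++ scanGo ((l1 :: l2 :: x :: y :: w).drop 2) := by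
    rw [scanGo]
    rw [show aaDict.get? ((u :: l1 :: l2 :: x :: y :: w).take 3) = some [v] from by
      simp only [aaDict, PySem.Dict.get?, hfind, Option.map_some]]
  have hshPl : Pl.all shapeB = true :=
    shape_sub fact_shape (fun kv hkv => by rw [hsplit]; simp [hkv])
  have hshmids : mids.all shapeB = true :=
    shape_sub fact_shape (fun kv hkv => by rw [hsplit]; simp [hkv])
  have hA : chain aaC (u :: l1 :: l2 :: x :: y :: w)
      = chain S2 (rep [v, x, y] [v'] (chain mids
          (rep [u, l1, l2] [v] (chain Pl (u :: l1 :: l2 :: x :: y :: w))))) := by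
    rw [hsplit]; simp [chain, List.foldl_append]
  have h1 : chain Pl (u :: l1 :: l2 :: x :: y :: w) = u :: l1 :: l2 :: x :: y :: chain Pl w := by
    rw [chain_cons_gen hshPl _ (fun kv hkv a b hkey _ => by
        have hh := List.all_eq_true.mp hPl kv hkv
        rw [hkey] at hh; simp at hh),
      chain_cons_low hshPl hl1, chain_cons_low hshPl hl2,
      chain_cons_low hshPl hx, chain_cons_low hshPl hy]
  have h2 : ∀ R : List Char, rep [u, l1, l2] [v] (u :: l1 :: l2 :: x :: y :: R)
      = v :: x :: y :: rep [u, l1, l2] [v] R := by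
    intro R
    rw [rep_pos (s := u :: l1 :: l2 :: x :: y :: R) ⟨x :: y :: R, rfl⟩ (by simp)]
    rw [show (u :: l1 :: l2 :: x :: y :: R).drop ([u, l1, l2] : List Char).length = x :: y :: R from rfl]
    rw [rep_cons_head_ne (by simpa using ne_of_lowB hu hx),
        rep_cons_head_ne (by simpa using ne_of_lowB hu hy)]
    rfl
  have h3 : ∀ R : List Char, chain mids (v :: x :: y :: R) = v :: x :: y :: chain mids R := by
    intro R
    rw [chain_cons_gen hshmids _ (fun kv hkv a b hkey hpre => by
        obtain ⟨hax, hrest⟩ := List.cons_prefix_cons.mp hpre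
        have hby : b = y := by
          have := singleton_prefix_iff.mp hrest
          simpa using this.symm
        have hh := List.all_eq_true.mp hmids kv hkv
        rw [hkey, hax, hby] at hh; simp at hh),
      chain_cons_low hshmids hx, chain_cons_low hshmids hy]
  have h4 : ∀ R : List Char, rep [v, x, y] [v'] (v :: x :: y :: R) = v' :: rep [v, x, y] [v'] R := by
    intro R
    rw [rep_pos (s := v :: x :: y :: R) ⟨R, rfl⟩ (by simp)]
    rfl
  have h5 : ∀ R : List Char, chain S2 (v' :: R) = v' :: chain S2 R :=
    fun R => chain_cons_nohead (fun kv hkv => by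
      have hh := List.all_eq_true.mp hS2 kv hkv
      simpa using hh) R
  rw [hA, h1, h2, h3, h4, h5, hB] at heq
  have : v' = v := by
    have := congrArg List.head? heq
    simpa using this
  exact hvne this

lemma PF_nil : PF [] := by
  intro p hp hinf
  have hl := hinf.length_le
  have : p = [] := List.length_eq_zero_iff.mp (by simpa using hl)
  subst this
  exact absurd hp (by decide)

lemma fact_pat_head : ∀ p ∈ pvPatternsC, (p.head?.elim false (fun c => !lowB c)) = true := by
  decide

-- ===== tightness: whenever a pattern occurs anywhere, the outputs differ =====
lemma tight_aux : ∀ (n : Nat) (s : List Char), s.length ≤ n → ¬ PF s → chain aaC s ≠ scanGo s := by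
  intro n
  induction n with
  | zero =>
    intro s hl hnpf
    have : s = [] := List.length_eq_zero_iff.mp (Nat.le_zero.mp hl)
    subst this
    exact absurd PF_nil hnpf
  | succ n ih =>
    intro s hl hnpf
    by_cases hcasc : ∃ p ∈ pvPatternsC, p <+: s
    · obtain ⟨p, hp, w, rfl⟩ := hcasc
      have hp' := hp
      simp only [pvPatternsC, List.mem_cons, List.not_mem_nil, or_false] at hp'
      rcases hp' with rfl | rfl | rfl | rfl | rfl | rfl | rfl
      · exact cascade_head [] [] (aaC.drop 2) 'A' 'l' 'a' 'r' 'g' 'A' 'R'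
          (by decide) (by decide) (by decide) (by decide) (by decide) (by decide)
          (by decide) (by decide) (by decide) w
      · exact cascade_head [] [(['A','r','g'], ['R'])] (aaC.drop 3) 'A' 'l' 'a' 's' 'n' 'A' 'N'
          (by decide) (by decide) (by decide) (by decide) (by decide) (by decide)
          (by decide) (by decide) (by decide) w
      · exact cascade_head [] [(['A','r','g'], ['R']), (['A','s','n'], ['N'])] (aaC.drop 4)
          'A' 'l' 'a' 's' 'p' 'A' 'D'
          (by decide) (by decide) (by decide) (by decide) (by decide) (by decide)
          (by decide) (by decide) (by decide) w
      · exact cascade_head (aaC.take 10) [] (aaC.drop 12) 'L' 'e' 'u' 'y' 's' 'L' 'K'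
          (by decide) (by decide) (by decide) (by decide) (by decide) (by decide)
          (by decide) (by decide) (by decide) w
      · exact cascade_head (aaC.take 16) [] (aaC.drop 18) 'T' 'h' 'r' 'r' 'p' 'T' 'W'
          (by decide) (by decide) (by decide) (by decide) (by decide) (by decide)
          (by decide) (by decide) (by decide) w
      · exact cascade_head (aaC.take 16) [(['T','r','p'], ['W'])] (aaC.drop 19) 'T' 'h' 'r' 'y' 'r' 'T' 'Y'
          (by decide) (by decide) (by decide) (by decide) (by decide) (by decide)
          (by decide) (by decide) (by decide) w
      · exact cascade_head (aaC.take 16)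
          [(['T','r','p'], ['W']), (['T','y','r'], ['Y']), (['V','a','l'], ['V'])] []
          'T' 'h' 'r' 'e' 'r' 'T' '*'
          (by decide) (by decide) (by decide) (by decide) (by decide) (by decide)
          (by decide) (by decide) (by decide) w
    · cases hfind : aaC.find? (fun p => p.1 == s.take 3) with
      | none =>
        cases s with
        | nil => exact absurd PF_nil hnpf
        | cons c t =>
          have hget : aaDict.get? ((c :: t).take 3) = none := by
            simp only [aaDict, PySem.Dict.get?, hfind, Option.map_none]
          have hnpt : ¬ PF t := by
            intro hpt; apply hnpf; intro p hp hinf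
            rcases List.infix_cons_iff.mp hinf with hpre | hinf2
            · exact hcasc ⟨p, hp, hpre⟩
            · exact hpt p hp hinf2
          rw [chain_nokey c t hfind, scanGo, hget]
          intro he
          injection he with he1 he2
          exact ih t (by simp at hl; omega) hnpt he2
      | some kvf =>
        have hmem : kvf ∈ aaC := List.mem_of_find?_eq_some hfind
        have hpred := List.find?_some hfind
        have hkey : kvf.1 = s.take 3 := by simpa using hpred
        obtain ⟨u, a, b, v, hkvf, hu, ha, hb, hv⟩ :=
          shape_elim (List.all_eq_true.mp fact_shape kvf hmem)
        have hk2 : kvf.2 = [v] := by rw [hkvf]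
        have htake : s.take 3 = [u, a, b] := by rw [← hkey, hkvf]
        obtain ⟨t, hst⟩ : ∃ t, s = u :: a :: b :: t := by
          refine ⟨s.drop 3, ?_⟩
          conv_lhs => rw [← List.take_append_drop 3 s]
          rw [htake]
          rfl
        have hnp : ∀ p ∈ pvPatternsC, ¬ p <+: s := fun p hp hpre => hcasc ⟨p, hp, hpre⟩
        have hget : aaDict.get? ((u :: a :: b :: t).take 3) = some kvf.2 := by
          have h3 : (u :: a :: b :: t).take 3 = s.take 3 := by rw [hst]
          rw [h3]
          simp only [aaDict, PySem.Dict.get?, hfind, Option.map_some]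
        have hnpt : ¬ PF t := by
          intro hpt; apply hnpf; intro p hp hinf
          have hlow := fact_pat_head p hp
          rw [hst] at hinf
          rcases List.infix_cons_iff.mp hinf with hpre | hinf2
          · exact hnp p hp (by rw [hst]; exact hpre)
          rcases List.infix_cons_iff.mp hinf2 with hpre | hinf3
          · match p, hpre with
            | c0 :: pr, hpre =>
              have := (List.cons_prefix_cons.mp hpre).1
              rw [this] at hlow
              simp [ha] at hlow
          rcases List.infix_cons_iff.mp hinf3 with hpre | hinf4
          · match p, hpre with
            | c0 :: pr, hpre =>
              have := (List.cons_prefix_cons.mp hpre).1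
              rw [this] at hlow
              simp [hb] at hlow
          · exact hpt p hp hinf4
        rw [chain_key_step s kvf u a b v t hfind hkvf hst hnp, hst, scanGo, hget, hk2]
        intro he
        have he2 : chain aaC t = scanGo ((a :: b :: t).drop 2) := by
          have := congrArg List.tail he
          simpa using this
        have hlt : t.length ≤ n := by rw [hst] at hl; simp at hl; omega
        exact ih t hlt hnpt (by simpa using he2)

-- ===== bridges to the String-level ports =====
lemma toList_foldA : ∀ (L : List (String × String)) (x : String),
    (∀ kv ∈ L, kv.1.toList ≠ []) →
    (L.foldl (fun result kv => PySem.Str.replace result kv.1 kv.2) x).toList =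
      chain (L.map (fun kv => (kv.1.toList, kv.2.toList))) x.toList := by
  intro L
  induction L with
  | nil => intro x _; rfl
  | cons kv L' ih =>
    intro x hne
    have h0 : kv.1.toList ≠ [] := hne kv (by simp)
    have : (PySem.Str.replace x kv.1 kv.2).toList =
        rep kv.1.toList kv.2.toList x.toList := by
      rw [PySem.Str.toList_replace, replace_eq_rep h0]
    calc (List.foldl (fun result kv => PySem.Str.replace result kv.1 kv.2) x (kv :: L')).toList
        = (List.foldl (fun result kv => PySem.Str.replace result kv.1 kv.2)
            (PySem.Str.replace x kv.1 kv.2) L').toList := rfl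
      _ = chain (L'.map (fun kv => (kv.1.toList, kv.2.toList)))
            (PySem.Str.replace x kv.1 kv.2).toList := ih _ (fun kv h => hne kv (by simp [h]))
      _ = _ := by rw [this]; rfl

-- ===== VERDICT (by name: the statement is the Claim_ definition above) =====
theorem shorten_hgvs_p_spec : Claim_unchanged_shorten_hgvs_p := by
  intro hgvs_p _
  unfold Spec_shorten_hgvs_p
  intro hnd
  apply String.toList_inj.mp
  have hA : (shorten_hgvs_p hgvs_p).toList = chain aaC hgvs_p.toList := by
    rw [shorten_hgvs_p, toList_foldA aaItems hgvs_p (by decide), fact_items]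
  have hB : (shorten_hgvs_p_alt hgvs_p).toList = scanGo hgvs_p.toList := by
    rw [shorten_hgvs_p_alt, String.toList_ofList]
  rw [hA, hB]
  apply chain_eq_scan hgvs_p.toList.length _ le_rfl
  intro p hp hinf
  apply hnd
  unfold D_shorten_hgvs_p
  simp only [pvPatternsC, List.mem_cons, List.not_mem_nil, or_false] at hp
  rcases hp with rfl | rfl | rfl | rfl | rfl | rfl | rfl
  · exact Or.inl ((PySem.Str.isIn_iff_infix _ hgvs_p).mpr (by simpa using hinf))
  · exact Or.inr (Or.inl ((PySem.Str.isIn_iff_infix _ hgvs_p).mpr (by simpa using hinf)))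
  · exact Or.inr (Or.inr (Or.inl ((PySem.Str.isIn_iff_infix _ hgvs_p).mpr (by simpa using hinf))))
  · exact Or.inr (Or.inr (Or.inr (Or.inl ((PySem.Str.isIn_iff_infix _ hgvs_p).mpr (by simpa using hinf)))))
  · exact Or.inr (Or.inr (Or.inr (Or.inr (Or.inl ((PySem.Str.isIn_iff_infix _ hgvs_p).mpr (by simpa using hinf))))))
  · exact Or.inr (Or.inr (Or.inr (Or.inr (Or.inr (Or.inl ((PySem.Str.isIn_iff_infix _ hgvs_p).mpr (by simpa using hinf)))))))
  · exact Or.inr (Or.inr (Or.inr (Or.inr (Or.inr (Or.inr ((PySem.Str.isIn_iff_infix _ hgvs_p).mpr (by simpa using hinf)))))))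

set_option maxRecDepth 8192 in
theorem shorten_hgvs_p_changed : Claim_changed_shorten_hgvs_p := by
  unfold Claim_changed_shorten_hgvs_p
  refine ⟨by decide, by decide, by decide, ?_, by decide⟩
  show shorten_hgvs_p_alt "Leuys" = "Lys"
  have e1 : aaDict.get? ((['L','e','u','y','s'] : List Char).take 3) = some ['L'] := by decide
  have e2 : aaDict.get? ((['y','s'] : List Char).take 3) = none := by decide
  have e3 : aaDict.get? ((['s'] : List Char).take 3) = none := by decide
  have hscan : scanGo ['L','e','u','y','s'] = ['L','y','s'] := by
    rw [scanGo, e1, show (['e','u','y','s'] : List Char).drop 2 = ['y','s'] from rfl,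
        scanGo, e2, scanGo, e3, scanGo]
    rfl
  have hfin : shorten_hgvs_p_alt "Leuys" = String.ofList ['L','y','s'] := by
    unfold shorten_hgvs_p_alt
    rw [show "Leuys".toList = ['L','e','u','y','s'] from by decide, hscan]
  exact hfin.trans (by decide)

theorem shorten_hgvs_p_tight : Claim_exact_shorten_hgvs_p := by
  intro hgvs_p _ hD heq
  have hA : (shorten_hgvs_p hgvs_p).toList = chain aaC hgvs_p.toList := by
    rw [shorten_hgvs_p, toList_foldA aaItems hgvs_p (by decide), fact_items]
  have hB : (shorten_hgvs_p_alt hgvs_p).toList = scanGo hgvs_p.toList := by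
    rw [shorten_hgvs_p_alt, String.toList_ofList]
  have heq' : chain aaC hgvs_p.toList = scanGo hgvs_p.toList := by
    rw [← hA, ← hB, heq]
  refine tight_aux hgvs_p.toList.length hgvs_p.toList le_rfl ?_ heq'
  intro hPF
  unfold D_shorten_hgvs_p at hD
  have drill : ∀ (pat : String), pat.toList ∈ pvPatternsC →
      PySem.Str.isIn pat hgvs_p = true → False := fun pat hpm hin =>
    hPF pat.toList hpm ((PySem.Str.isIn_iff_infix pat hgvs_p).mp hin)
  rcases hD with h | h | h | h | h | h | h
  · exact drill "Alarg" (by decide) h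
  · exact drill "Alasn" (by decide) h
  · exact drill "Alasp" (by decide) h
  · exact drill "Leuys" (by decide) h
  · exact drill "Thrrp" (by decide) h
  · exact drill "Thryr" (by decide) h
  · exact drill "Threr" (by decide) h
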